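-- pv_equiv track=rewrite | github.com/Disasm/rust-ewg-meta | k210/parse-header.py | extract_contents
-- ===== SOURCE A (Python) =====
-- def extract_contents(block):
--     contents = []
--     active = False
--     for line in block:
--         sline = line.strip()
--         if line.startswith("{"):
--             active = True
--             continue
--         if active:
--             if line.startswith("}"):
--                 break
--             contents.append(sline)
--     return contents
-- ===== SOURCE B (Python) =====
-- def extract_contents(block):
--     starts = [i for i, l in enumerate(block) if l.startswith("{")]
--     if not starts:
--         return []
--     open_i = starts[0]
--     closes = [i for i, l in enumerate(block) if i > open_i and l.startswith("}")]
--     close_i = closes[0] if closes else len(block)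
--     return [l.strip() for l in block[open_i + 1:close_i] if not l.startswith("{")]
-- ===== Notes on version B (the rewrite author's own statement) =====
-- stated objective: alternative
-- what changed: Replaces the stateful flag-and-break loop with staged index arithmetic: enumerate-and-filter to find the first '{' index and the first '}' index after it, then slice the block between them and strip/filter that slice.
import Mathlib
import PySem

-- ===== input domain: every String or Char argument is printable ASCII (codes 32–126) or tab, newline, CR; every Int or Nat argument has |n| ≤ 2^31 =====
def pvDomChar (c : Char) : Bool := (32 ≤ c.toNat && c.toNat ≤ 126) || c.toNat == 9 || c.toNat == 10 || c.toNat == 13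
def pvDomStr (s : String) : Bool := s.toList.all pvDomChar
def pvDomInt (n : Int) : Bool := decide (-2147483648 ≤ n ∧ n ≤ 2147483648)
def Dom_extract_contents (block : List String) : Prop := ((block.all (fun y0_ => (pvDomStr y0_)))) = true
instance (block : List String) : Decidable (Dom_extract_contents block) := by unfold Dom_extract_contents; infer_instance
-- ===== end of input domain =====

-- B replaces A's stateful flag-and-break loop by staged index arithmetic: find the first '{' index and the
-- first '}' index after it via enumerate+filter, then slice the block between them and strip/filter (alternative decomposition, same cost).


-- ===== PORT A =====
-- A's for-loop with the `active` flag and `break`, as structural recursion over the lines.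
def ecGo : List String → Bool → List String → List String
  | [], _, contents => contents
  | line :: rest, active, contents =>
    if PySem.Str.startswith line "{" then ecGo rest true contents
    else if active then
      if PySem.Str.startswith line "}" then contents
      else ecGo rest active (contents ++ [PySem.Str.strip line])
    else ecGo rest active contents

def extract_contents (block : List String) : List String := ecGo block false []

-- ===== PORT B =====
-- Source B: starts = [i for i,l in enumerate(block) if l.startswith("{")]; if empty return [];
--       closes = [i for i,l in enumerate(block) if i > open_i and l.startswith("}")];
--       close_i = closes[0] if closes else len(block); slice, filter interior "{" lines, strip.
def extract_contents_alt (block : List String) : List String :=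
  let starts := ((PySem.List.enumerate block).filter (fun pr => PySem.Str.startswith pr.2 "{")).map Prod.fst
  match starts with
  | [] => []
  | openI :: _ =>
    let closes := ((PySem.List.enumerate block).filter
        (fun pr => decide (openI < pr.1) && PySem.Str.startswith pr.2 "}")).map Prod.fst
    let closeI := closes.headD (block.length : Int)
    ((PySem.List.slice block (some (openI + 1)) (some closeI)).filter
        (fun l => !PySem.Str.startswith l "{")).map PySem.Str.strip

-- ===== PRECONDITION & SPEC =====
def Spec_extract_contents (block : List String) (out : List String) : Prop := out = extract_contents_alt block
instance (block : List String) (out : List String) : Decidable (Spec_extract_contents block out) := by unfold Spec_extract_contents; infer_instance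

-- ===== CLAIM (what is proved, stated in full; the proofs are below) =====
def Claim_equal_extract_contents : Prop := ∀ (block : List String), Dom_extract_contents block → Spec_extract_contents block (extract_contents block)

-- ===== LEMMAS AND PROOFS =====

-- a string starting with "{" does not start with "}"
theorem not_starts_close {l : String} (h : PySem.Str.startswith l "{" = true) :
    PySem.Str.startswith l "}" = false := by
  by_contra hc
  have h1 := (PySem.Chars.startswith_iff (s := l.toList) (p := "{".toList)).1 (by simpa using h)
  have h2 := (PySem.Chars.startswith_iff (s := l.toList) (p := "}".toList)).1
    (by simpa using (Bool.of_not_eq_false hc))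
  obtain ⟨t1, e1⟩ := h1
  obtain ⟨t2, e2⟩ := h2
  rw [← e1] at e2
  simp at e2

-- active phase of A's loop: collects stripped lines up to the first "}" line, skipping "{" lines
theorem ecGo_active (ls : List String) (acc : List String) :
    ecGo ls true acc
      = acc ++ ((ls.takeWhile (fun l => !PySem.Str.startswith l "}")).filter
          (fun l => !PySem.Str.startswith l "{")).map PySem.Str.strip := by
  induction ls generalizing acc with
  | nil => simp [ecGo]
  | cons l ls ih =>
    by_cases h1 : PySem.Str.startswith l "{" = true
    · have h1' : PySem.Chars.startswith l.toList ['{'] = true := by simpa using h1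
      have h2' : PySem.Chars.startswith l.toList ['}'] = false := by
        simpa using not_starts_close h1
      simp [ecGo, h1', h2', ih]
    · have h1' : PySem.Chars.startswith l.toList ['{'] = false := by
        simpa using (eq_false_of_ne_true h1)
      by_cases h2 : PySem.Str.startswith l "}" = true
      · have h2' : PySem.Chars.startswith l.toList ['}'] = true := by simpa using h2
        simp [ecGo, h1', h2']
      · have h2' : PySem.Chars.startswith l.toList ['}'] = false := by
          simpa using (eq_false_of_ne_true h2)
        simp [ecGo, h1', h2', ih]

-- skip phase of A's loop: dropWhile to the first "{" line, consume it, then the active phase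
theorem ecGo_skip (ls : List String) :
    ecGo ls false []
      = ecGo ((ls.dropWhile (fun l => !PySem.Str.startswith l "{")).drop 1) true [] := by
  induction ls with
  | nil => simp [ecGo]
  | cons l ls ih =>
    by_cases h : PySem.Str.startswith l "{" = true
    · have h' : PySem.Chars.startswith l.toList ['{'] = true := by simpa using h
      simp [ecGo, h']
    · have h' : PySem.Chars.startswith l.toList ['{'] = false := by
        simpa using (eq_false_of_ne_true h)
      simp [ecGo, h', ih]

-- head of the filtered-enumerate index list = first index satisfying the predicate (shifted by the offset)
theorem head_filter_enumerate {α : Type} (pr : α → Bool) (l : List α) (s : Int) :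
    ((((PySem.List.enumerate l s).filter (fun x => pr x.2)).map Prod.fst).head?)
      = (List.findIdx? pr l).map (fun k => s + (k : Int)) := by
  induction l generalizing s with
  | nil => simp [PySem.List.enumerate]
  | cons a l ih =>
    by_cases h : pr a = true
    · simp [PySem.List.enumerate_cons, h, List.findIdx?_cons]
    · have h' : pr a = false := eq_false_of_ne_true h
      rw [PySem.List.enumerate_cons]
      simp only [List.filter_cons, h', List.findIdx?_cons]
      simp only [Bool.false_eq_true, if_false]
      rw [ih]
      cases hf : List.findIdx? pr l <;> simp [hf] <;> push_cast <;> ring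

-- dropWhile (¬pr) in terms of the first index where pr holds
theorem dropWhile_eq_findIdx? {α : Type} (pr : α → Bool) (l : List α) :
    l.dropWhile (fun x => !pr x)
      = (match List.findIdx? pr l with | some k => l.drop k | none => []) := by
  induction l with
  | nil => simp
  | cons a l ih =>
    by_cases h : pr a = true
    · simp [List.dropWhile_cons, h, List.findIdx?_cons]
    · have h' : pr a = false := eq_false_of_ne_true h
      simp only [List.dropWhile_cons, h', List.findIdx?_cons]
      simp only [Bool.not_false, if_true, Bool.false_eq_true, if_false]
      rw [ih]
      cases hf : List.findIdx? pr l <;> simp [hf]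

-- takeWhile (¬pr) in terms of the first index where pr holds
theorem takeWhile_eq_findIdx? {α : Type} (pr : α → Bool) (l : List α) :
    l.takeWhile (fun x => !pr x)
      = (match List.findIdx? pr l with | some k => l.take k | none => l) := by
  induction l with
  | nil => simp
  | cons a l ih =>
    by_cases h : pr a = true
    · simp [List.takeWhile_cons, h, List.findIdx?_cons]
    · have h' : pr a = false := eq_false_of_ne_true h
      simp only [List.takeWhile_cons, h', List.findIdx?_cons]
      simp only [Bool.not_false, if_true, Bool.false_eq_true, if_false]
      rw [ih]
      cases hf : List.findIdx? pr l <;> simp [hf]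

-- the "index > k" filter over the whole enumeration = a plain filter over the enumeration of the tail after k
theorem filter_enumerate_gt {α : Type} (q : α → Bool) (l : List α) (k : Nat) (hk : k < l.length) :
    ((PySem.List.enumerate l).filter (fun x => decide ((k : Int) < x.1) && q x.2))
      = (PySem.List.enumerate (l.drop (k + 1)) ((k : Int) + 1)).filter (fun x => q x.2) := by
  conv_lhs => rw [← List.take_append_drop (k + 1) l]
  rw [show PySem.List.enumerate (l.take (k+1) ++ l.drop (k+1))
        = PySem.List.enumerate (l.take (k+1) ++ l.drop (k+1)) 0 from rfl,
      PySem.List.enumerate_append, List.filter_append]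
  have hlen : (l.take (k+1)).length = k + 1 := by
    simp [List.length_take]; omega
  have h1 : (PySem.List.enumerate (l.take (k+1)) 0).filter
      (fun x => decide ((k : Int) < x.1) && q x.2) = [] := by
    rw [List.filter_eq_nil_iff]
    intro x hx
    obtain ⟨j, hj, rfl⟩ := (PySem.List.mem_enumerate_iff _ _ _).1 hx
    have : j ≤ k := by omega
    simp only [Bool.and_eq_true, decide_eq_true_eq, not_and]
    intro hlt
    omega
  have h2 : (PySem.List.enumerate (l.drop (k+1)) (0 + (l.take (k+1)).length)).filter
      (fun x => decide ((k : Int) < x.1) && q x.2)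
      = (PySem.List.enumerate (l.drop (k+1)) ((k : Int) + 1)).filter (fun x => q x.2) := by
    rw [hlen]
    have hoff : ((0 : Int) + ((k + 1 : Nat) : Int)) = (k : Int) + 1 := by push_cast; ring
    rw [hoff]
    apply List.filter_congr
    intro x hx
    obtain ⟨j, hj, rfl⟩ := (PySem.List.mem_enumerate_iff _ _ _).1 hx
    have : (k : Int) < (k : Int) + 1 + (j : Int) := by push_cast; omega
    simp [this]
  rw [h1, h2, List.nil_append]

-- findIdx? bound
theorem findIdx?_lt_length {α : Type} {pr : α → Bool} {l : List α} {k : Nat}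
    (h : List.findIdx? pr l = some k) : k < l.length :=
  List.findIdx?_eq_some_iff_findIdx_eq.1 h |>.1

-- ===== VERDICT (by name: the statement is the Claim_ definition above) =====
theorem extract_contents_spec : Claim_equal_extract_contents := by
  intro block _
  unfold Spec_extract_contents extract_contents extract_contents_alt
  have hstarts := head_filter_enumerate (fun l => PySem.Str.startswith l "{") block 0
  cases hf : List.findIdx? (fun l => PySem.Str.startswith l "{") block with
  | none =>
    rw [hf] at hstarts
    have hs : (((PySem.List.enumerate block).filter
        (fun pr => PySem.Str.startswith pr.2 "{")).map Prod.fst) = [] :=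
      List.head?_eq_none_iff.1 (by simpa using hstarts)
    rw [ecGo_skip, dropWhile_eq_findIdx?, hf, hs]
    simp [ecGo]
  | some k =>
    have hk : k < block.length := findIdx?_lt_length hf
    rw [hf] at hstarts
    cases hst : (((PySem.List.enumerate block).filter
        (fun pr => PySem.Str.startswith pr.2 "{")).map Prod.fst) with
    | nil => rw [hst] at hstarts; simp at hstarts
    | cons o t =>
      rw [hst] at hstarts
      have ho : o = (k : Int) := by simpa using hstarts
      subst ho
      rw [ecGo_skip, dropWhile_eq_findIdx?, hf]
      simp only []
      rw [show List.drop 1 (List.drop k block) = List.drop (k + 1) block by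
            rw [List.drop_drop]]
      rw [ecGo_active, List.nil_append,
          takeWhile_eq_findIdx? (fun l => PySem.Str.startswith l "}"),
          filter_enumerate_gt (fun l => PySem.Str.startswith l "}") block k hk]
      have hcl := head_filter_enumerate (fun l => PySem.Str.startswith l "}")
        (block.drop (k + 1)) ((k : Int) + 1)
      cases hq : List.findIdx? (fun l => PySem.Str.startswith l "}") (block.drop (k + 1)) with
      | none =>
        rw [hq] at hcl
        have hclnil : ((PySem.List.enumerate (block.drop (k+1)) ((k : Int) + 1)).filter
            (fun x => PySem.Str.startswith x.2 "}")).map Prod.fst = [] :=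
          List.head?_eq_none_iff.1 (by simpa using hcl)
        rw [hclnil]
        simp only [List.headD_nil]
        rw [show ((k : Int) + 1) = (((k + 1 : Nat) : Int)) by push_cast; ring,
            show ((block.length : Int)) = (((block.length : Nat) : Int)) by rfl,
            PySem.List.slice_natCast]
        rw [List.take_of_length_le (by simp)]
      | some m =>
        rw [hq] at hcl
        cases hcll : ((PySem.List.enumerate (block.drop (k+1)) ((k : Int) + 1)).filter
            (fun x => PySem.Str.startswith x.2 "}")).map Prod.fst with
        | nil => rw [hcll] at hcl; simp at hcl
        | cons c ct =>
          rw [hcll] at hcl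
          have hc : c = (k : Int) + 1 + (m : Int) := by simpa using hcl
          subst hc
          simp only [List.headD_cons]
          rw [show ((k : Int) + 1) = (((k + 1 : Nat) : Int)) by push_cast; ring,
              show ((((k + 1 : Nat) : Int)) + (m : Int)) = (((k + 1 + m : Nat) : Int)) by push_cast; ring,
              PySem.List.slice_natCast]
          have : k + 1 + m - (k + 1) = m := by omega
          rw [this]
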